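-- pv_equiv track=rewrite | github.com/hwangtamu/userstudy | public/data/rdiff.py | get_star_date
-- ===== SOURCE A (Python) =====
-- def get_star_date(date_1, date_2):
--     #print date_1, date_2
--     if (len(date_1) < 10) & (len(date_2) < 10):
--         return "", ""
--     if len(date_1) < 10:
--         return "", date_2[:2] + date_2[3:5] + date_2[6:]
--     if len(date_2) < 10:
--         return date_1[:2] + date_1[3:5] + date_1[6:], ""
--     final_1 = ""
--     final_2 = ""
--     ind = [0,1,3,4,6,7,8,9]
--
--     for i in ind:
--         if date_1[i] == date_2[i]:
--             final_1 = final_1 + "*"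
--             final_2 = final_2 + "*"
--         else:
--             final_1 = final_1 + date_1[i]
--             final_2 = final_2 + date_2[i]
--     return final_1,final_2
-- ===== SOURCE B (Python) =====
-- def _mask(xs, ys):
--     # recursively mask two equal-length segments back-to-front
--     if not xs or not ys:
--         return "", ""
--     r1, r2 = _mask(xs[1:], ys[1:])
--     if xs[0] == ys[0]:
--         return "*" + r1, "*" + r2
--     return xs[0] + r1, ys[0] + r2
--
-- def get_star_date(date_1, date_2):
--     if len(date_1) < 10 and len(date_2) < 10:
--         return "", ""
--     if len(date_1) < 10:
--         return "", date_2[:2] + date_2[3:5] + date_2[6:]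
--     if len(date_2) < 10:
--         return date_1[:2] + date_1[3:5] + date_1[6:], ""
--     # mask field by field: the three separator-delimited components of the date
--     out_1, out_2 = "", ""
--     for a, b in ((0, 2), (3, 5), (6, 10)):
--         s1, s2 = _mask(date_1[a:b], date_2[a:b])
--         out_1 += s1
--         out_2 += s2
--     return out_1, out_2
-- ===== Notes on version B (the rewrite author's own statement) =====
-- stated objective: alternative
-- what changed: Replaces A's single iterative loop over a hardcoded index list into the raw strings with a field decomposition: each date is split into its three separator-delimited components (slices 0:2, 3:5, 6:10), each field pair is masked by a recursive back-to-front helper, and the masked segments are concatenated.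
import Mathlib
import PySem

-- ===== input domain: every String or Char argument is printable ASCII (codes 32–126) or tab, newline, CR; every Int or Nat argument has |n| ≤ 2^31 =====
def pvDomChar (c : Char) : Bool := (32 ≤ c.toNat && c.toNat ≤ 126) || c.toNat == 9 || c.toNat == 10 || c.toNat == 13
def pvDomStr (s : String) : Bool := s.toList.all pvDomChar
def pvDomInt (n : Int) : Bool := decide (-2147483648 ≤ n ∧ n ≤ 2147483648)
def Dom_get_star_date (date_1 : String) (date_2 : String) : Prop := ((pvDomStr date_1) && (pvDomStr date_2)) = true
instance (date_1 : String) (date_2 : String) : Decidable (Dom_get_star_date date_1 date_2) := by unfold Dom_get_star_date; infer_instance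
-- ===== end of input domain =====

-- B replaces A's single loop over a hardcoded index list by a field decomposition:
-- the three separator-delimited components are masked by a recursive helper and concatenated (objective: alternative).

-- ===== PORT A =====
-- literal port of A: three length guards, then a fold over the index list [0,1,3,4,6,7,8,9];
-- the ' ' default of pyGetD is never reached (both lengths are ≥ 10 in that branch, indices ≤ 9).
def get_star_date (date_1 : String) (date_2 : String) : String × String :=
  if date_1.toList.length < 10 ∧ date_2.toList.length < 10 then ("", "")
  else if date_1.toList.length < 10 then
    ("", String.mk (PySem.List.slice date_2.toList none (some 2) ++ PySem.List.slice date_2.toList (some 3) (some 5) ++ PySem.List.slice date_2.toList (some 6) none))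
  else if date_2.toList.length < 10 then
    (String.mk (PySem.List.slice date_1.toList none (some 2) ++ PySem.List.slice date_1.toList (some 3) (some 5) ++ PySem.List.slice date_1.toList (some 6) none), "")
  else
    let p := ([0, 1, 3, 4, 6, 7, 8, 9] : List Int).foldl
      (fun (p : List Char × List Char) i =>
        if PySem.List.pyGetD date_1.toList i ' ' = PySem.List.pyGetD date_2.toList i ' ' then
          (p.1 ++ ['*'], p.2 ++ ['*'])
        else
          (p.1 ++ [PySem.List.pyGetD date_1.toList i ' '], p.2 ++ [PySem.List.pyGetD date_2.toList i ' '])) ([], [])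
    (String.mk p.1, String.mk p.2)

-- ===== PORT B =====
-- B-side helper: _mask, recursive back-to-front masking of two segments
def pvMask : List Char → List Char → List Char × List Char
  | [], _ => ([], [])
  | _ :: _, [] => ([], [])
  | x :: xs, y :: ys =>
    let r := pvMask xs ys
    if x = y then ('*' :: r.1, '*' :: r.2) else (x :: r.1, y :: r.2)

def get_star_date_alt (date_1 : String) (date_2 : String) : String × String :=
  if date_1.toList.length < 10 ∧ date_2.toList.length < 10 then ("", "")
  else if date_1.toList.length < 10 then
    ("", String.mk (PySem.List.slice date_2.toList none (some 2) ++ PySem.List.slice date_2.toList (some 3) (some 5) ++ PySem.List.slice date_2.toList (some 6) none))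
  else if date_2.toList.length < 10 then
    (String.mk (PySem.List.slice date_1.toList none (some 2) ++ PySem.List.slice date_1.toList (some 3) (some 5) ++ PySem.List.slice date_1.toList (some 6) none), "")
  else
    let p := ([((0 : Int), (2 : Int)), (3, 5), (6, 10)]).foldl
      (fun (o : List Char × List Char) ab =>
        let s := pvMask (PySem.List.slice date_1.toList (some ab.1) (some ab.2))
                        (PySem.List.slice date_2.toList (some ab.1) (some ab.2))
        (o.1 ++ s.1, o.2 ++ s.2)) ([], [])
    (String.mk p.1, String.mk p.2)

-- ===== PRECONDITION & SPEC =====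
def Spec_get_star_date (date_1 : String) (date_2 : String) (out : String × String) : Prop := out = get_star_date_alt date_1 date_2
instance (date_1 : String) (date_2 : String) (out : String × String) : Decidable (Spec_get_star_date date_1 date_2 out) := by unfold Spec_get_star_date; infer_instance

-- ===== CLAIM (what is proved, stated in full; the proofs are below) =====
def Claim_equal_get_star_date : Prop := ∀ (date_1 : String) (date_2 : String), Dom_get_star_date date_1 date_2 → Spec_get_star_date date_1 date_2 (get_star_date date_1 date_2)

-- ===== LEMMAS AND PROOFS =====

theorem pv_ten (l : List Char) (h : 10 ≤ l.length) :
    ∃ a0 a1 a2 a3 a4 a5 a6 a7 a8 a9 r, l = a0::a1::a2::a3::a4::a5::a6::a7::a8::a9::r := by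
  match l, h with
  | a0::a1::a2::a3::a4::a5::a6::a7::a8::a9::r, _ =>
    exact ⟨a0,a1,a2,a3,a4,a5,a6,a7,a8,a9,r, rfl⟩

-- A's masking fold builds the two result lists as independent maps over the index list
theorem pv_foldl_pair (F G : Int → Char) (l : List Int) (x y : List Char) :
    l.foldl (fun (p : List Char × List Char) i => (p.1 ++ [F i], p.2 ++ [G i])) (x, y) =
      (x ++ l.map F, y ++ l.map G) := by
  induction l generalizing x y with
  | nil => simp
  | cons a t ih => simp [List.foldl, ih]

theorem pvMask_nil : pvMask [] [] = ([], []) := rfl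

-- pvMask, elementwise
theorem pvMask_cons (x y : Char) (xs ys : List Char) :
    pvMask (x :: xs) (y :: ys) =
      ((if x = y then '*' else x) :: (pvMask xs ys).1,
       (if x = y then '*' else y) :: (pvMask xs ys).2) := by
  simp only [pvMask]; split <;> simp

-- the core agreement in the main branch
set_option maxHeartbeats 1000000 in
theorem pv_main (l1 l2 : List Char) (h1 : ¬ l1.length < 10) (h2 : ¬ l2.length < 10) :
    (let p := ([0, 1, 3, 4, 6, 7, 8, 9] : List Int).foldl
      (fun (p : List Char × List Char) i =>
        if PySem.List.pyGetD l1 i ' ' = PySem.List.pyGetD l2 i ' ' then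
          (p.1 ++ ['*'], p.2 ++ ['*'])
        else
          (p.1 ++ [PySem.List.pyGetD l1 i ' '], p.2 ++ [PySem.List.pyGetD l2 i ' '])) ([], [])
     (String.mk p.1, String.mk p.2)) =
    (let p := ([((0 : Int), (2 : Int)), (3, 5), (6, 10)]).foldl
      (fun (o : List Char × List Char) ab =>
        let s := pvMask (PySem.List.slice l1 (some ab.1) (some ab.2))
                        (PySem.List.slice l2 (some ab.1) (some ab.2))
        (o.1 ++ s.1, o.2 ++ s.2)) ([], [])
     (String.mk p.1, String.mk p.2)) := by
  obtain ⟨a0,a1,a2,a3,a4,a5,a6,a7,a8,a9,r1,rfl⟩ := pv_ten l1 (by omega)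
  obtain ⟨b0,b1,b2,b3,b4,b5,b6,b7,b8,b9,r2,rfl⟩ := pv_ten l2 (by omega)
  have hstep : ∀ (l1 l2 : List Char), (fun (p : List Char × List Char) (i : Int) =>
      if PySem.List.pyGetD l1 i ' ' = PySem.List.pyGetD l2 i ' ' then
        (p.1 ++ ['*'], p.2 ++ ['*'])
      else
        (p.1 ++ [PySem.List.pyGetD l1 i ' '], p.2 ++ [PySem.List.pyGetD l2 i ' '])) =
      (fun (p : List Char × List Char) (i : Int) =>
        (p.1 ++ [if PySem.List.pyGetD l1 i ' ' = PySem.List.pyGetD l2 i ' ' then '*'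
                 else PySem.List.pyGetD l1 i ' '],
         p.2 ++ [if PySem.List.pyGetD l1 i ' ' = PySem.List.pyGetD l2 i ' ' then '*'
                 else PySem.List.pyGetD l2 i ' '])) := by
    intro l1 l2; funext p i; split_ifs <;> rfl
  simp only [hstep, pv_foldl_pair, List.nil_append]
  have s1a : PySem.List.slice (a0::a1::a2::a3::a4::a5::a6::a7::a8::a9::r1) (some 0) (some 2) = [a0,a1] := by
    simp [PySem.List.slice, PySem.List.clampIdx]
  have s1b : PySem.List.slice (b0::b1::b2::b3::b4::b5::b6::b7::b8::b9::r2) (some 0) (some 2) = [b0,b1] := by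
    simp [PySem.List.slice, PySem.List.clampIdx]
  have s2a : PySem.List.slice (a0::a1::a2::a3::a4::a5::a6::a7::a8::a9::r1) (some 3) (some 5) = [a3,a4] := by
    simp [PySem.List.slice, PySem.List.clampIdx]
  have s2b : PySem.List.slice (b0::b1::b2::b3::b4::b5::b6::b7::b8::b9::r2) (some 3) (some 5) = [b3,b4] := by
    simp [PySem.List.slice, PySem.List.clampIdx]
  have s3a : PySem.List.slice (a0::a1::a2::a3::a4::a5::a6::a7::a8::a9::r1) (some 6) (some 10) = [a6,a7,a8,a9] := by
    simp [PySem.List.slice, PySem.List.clampIdx]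
  have s3b : PySem.List.slice (b0::b1::b2::b3::b4::b5::b6::b7::b8::b9::r2) (some 6) (some 10) = [b6,b7,b8,b9] := by
    simp [PySem.List.slice, PySem.List.clampIdx]
  have ga0 : PySem.List.pyGetD (a0::a1::a2::a3::a4::a5::a6::a7::a8::a9::r1) 0 ' ' = a0 := by simp [pysem]
  have gb0 : PySem.List.pyGetD (b0::b1::b2::b3::b4::b5::b6::b7::b8::b9::r2) 0 ' ' = b0 := by simp [pysem]
  have ga1 : PySem.List.pyGetD (a0::a1::a2::a3::a4::a5::a6::a7::a8::a9::r1) 1 ' ' = a1 := by simp [pysem]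
  have gb1 : PySem.List.pyGetD (b0::b1::b2::b3::b4::b5::b6::b7::b8::b9::r2) 1 ' ' = b1 := by simp [pysem]
  have ga3 : PySem.List.pyGetD (a0::a1::a2::a3::a4::a5::a6::a7::a8::a9::r1) 3 ' ' = a3 := by simp [pysem]
  have gb3 : PySem.List.pyGetD (b0::b1::b2::b3::b4::b5::b6::b7::b8::b9::r2) 3 ' ' = b3 := by simp [pysem]
  have ga4 : PySem.List.pyGetD (a0::a1::a2::a3::a4::a5::a6::a7::a8::a9::r1) 4 ' ' = a4 := by simp [pysem]
  have gb4 : PySem.List.pyGetD (b0::b1::b2::b3::b4::b5::b6::b7::b8::b9::r2) 4 ' ' = b4 := by simp [pysem]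
  have ga6 : PySem.List.pyGetD (a0::a1::a2::a3::a4::a5::a6::a7::a8::a9::r1) 6 ' ' = a6 := by simp [pysem]
  have gb6 : PySem.List.pyGetD (b0::b1::b2::b3::b4::b5::b6::b7::b8::b9::r2) 6 ' ' = b6 := by simp [pysem]
  have ga7 : PySem.List.pyGetD (a0::a1::a2::a3::a4::a5::a6::a7::a8::a9::r1) 7 ' ' = a7 := by simp [pysem]
  have gb7 : PySem.List.pyGetD (b0::b1::b2::b3::b4::b5::b6::b7::b8::b9::r2) 7 ' ' = b7 := by simp [pysem]
  have ga8 : PySem.List.pyGetD (a0::a1::a2::a3::a4::a5::a6::a7::a8::a9::r1) 8 ' ' = a8 := by simp [pysem]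
  have gb8 : PySem.List.pyGetD (b0::b1::b2::b3::b4::b5::b6::b7::b8::b9::r2) 8 ' ' = b8 := by simp [pysem]
  have ga9 : PySem.List.pyGetD (a0::a1::a2::a3::a4::a5::a6::a7::a8::a9::r1) 9 ' ' = a9 := by simp [pysem]
  have gb9 : PySem.List.pyGetD (b0::b1::b2::b3::b4::b5::b6::b7::b8::b9::r2) 9 ' ' = b9 := by simp [pysem]
  simp only [List.foldl, s1a, s1b, s2a, s2b, s3a, s3b, ga0, gb0, ga1, gb1, ga3, gb3, ga4, gb4,
    ga6, gb6, ga7, gb7, ga8, gb8, ga9, gb9, List.map, pvMask_cons, pvMask_nil,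
    List.nil_append, List.cons_append]

-- ===== VERDICT (by name: the statement is the Claim_ definition above) =====
theorem get_star_date_spec : Claim_equal_get_star_date := by
  intro d1 d2 _
  unfold Spec_get_star_date get_star_date get_star_date_alt
  by_cases h1 : d1.toList.length < 10 <;> by_cases h2 : d2.toList.length < 10 <;>
    simp only [h1, h2, and_self, and_true, and_false, if_true, if_false]
  all_goals first
    | rfl
    | exact pv_main _ _ h1 h2
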